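-- pv_equiv track=rewrite | github.com/jayeshbhandarkar/LeetCode | 1504_Count_Submatrices_With_All_Ones.py | numSubmat
-- ===== SOURCE A (Python) =====
-- def numSubmat(mat):
--     m, n = len(mat), len(mat[0])
--     result = 0
--
--     for r1 in range(m):
--         col = [1] * n
--         for r2 in range(r1, m):
--             for j in range(n):
--                 col[j] &= mat[r2][j]
--
--             cons = 0
--             for j in range(n):
--                 if col[j] == 1:
--                     cons += 1
--                     result += cons
--                 else:
--                     cons = 0
--
--     return result
-- ===== SOURCE B (Python) =====
-- def numSubmat(mat):
--     # Histogram approach: one pass over rows; heights[j] = consecutive odd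
--     # streak ending at the current row (col[j] in A is just the parity of the
--     # column AND, since it starts from 1).  Per row, sum running minima of
--     # heights over column intervals, stopping early at a zero.
--     n = len(mat[0])
--     heights = [0] * n
--     total = 0
--     for row in mat:
--         heights = [heights[j] + 1 if row[j] % 2 == 1 else 0 for j in range(n)]
--         for j1 in range(n):
--             mn = heights[j1]
--             for j2 in range(j1, n):
--                 if heights[j2] < mn:
--                     mn = heights[j2]
--                 if mn == 0:
--                     break
--                 total += mn
--     return total
-- ===== Notes on version B (the rewrite author's own statement) =====
-- stated objective: faster
-- what changed: Replaces A's enumeration of all top-row/bottom-row pairs (re-ANDing a column mask per pair) by a single pass over rows that maintains a histogram of consecutive-odd column heights and, per row, sums running minima of heights over column intervals, stopping a scan at the first zero height.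
import Mathlib
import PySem

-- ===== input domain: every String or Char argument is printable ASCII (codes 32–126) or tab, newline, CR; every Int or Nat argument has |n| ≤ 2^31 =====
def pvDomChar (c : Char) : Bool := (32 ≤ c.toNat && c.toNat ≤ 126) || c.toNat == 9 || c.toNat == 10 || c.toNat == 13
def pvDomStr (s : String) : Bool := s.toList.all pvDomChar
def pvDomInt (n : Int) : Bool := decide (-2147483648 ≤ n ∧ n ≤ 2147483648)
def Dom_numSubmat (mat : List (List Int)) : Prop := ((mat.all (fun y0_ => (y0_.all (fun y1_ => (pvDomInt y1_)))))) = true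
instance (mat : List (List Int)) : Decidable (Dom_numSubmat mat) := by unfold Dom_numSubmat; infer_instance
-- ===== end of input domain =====

-- B replaces A's O(m^2*n) top/bottom row-pair enumeration by one pass over the rows that
-- maintains consecutive-odd column heights and sums running minima per row (stopping a scan early at a zero height).

-- ===== PORT A =====
def numSubmat (mat : List (List Int)) : Int :=
  let m := mat.length
  let n := (mat.getD 0 []).length
  (List.range m).foldl (fun result r1 =>
    ((List.range' r1 (m - r1)).foldl (fun (st : List Int × Int) r2 =>
      let col := (List.range n).foldl
        (fun c j => c.set j (PySem.Int.band (c.getD j 0) ((mat.getD r2 []).getD j 0))) st.1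
      let q := (List.range n).foldl
        (fun (p : Int × Int) j =>
          if col.getD j 0 == 1 then (p.1 + 1, p.2 + (p.1 + 1)) else (0, p.2))
        (0, st.2)
      (col, q.2)) (List.replicate n 1, result)).2) 0

-- ===== PORT B =====
-- numSubmat_innerRun is the inner `for j2 in range(j1, n)` loop of Source B, with its running
-- minimum and `break`
def numSubmat_innerRun (heights : List Int) : List Nat → Int → Int → Int
  | [], _, total => total
  | j2 :: rest, mn, total =>
    let mn' := if heights.getD j2 0 < mn then heights.getD j2 0 else mn
    if mn' == 0 then total else numSubmat_innerRun heights rest mn' (total + mn')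

def numSubmat_alt (mat : List (List Int)) : Int :=
  let n := (mat.getD 0 []).length
  (mat.foldl (fun (st : List Int × Int) row =>
    let heights := (List.range n).map (fun j =>
      if PySem.Int.mod (row.getD j 0) 2 == 1 then st.1.getD j 0 + 1 else 0)
    let total := (List.range n).foldl (fun total j1 =>
      numSubmat_innerRun heights (List.range' j1 (n - j1)) (heights.getD j1 0) total) st.2
    (heights, total)) (List.replicate n 0, 0)).2

-- ===== PRECONDITION & SPEC =====
-- Pre_ excludes exactly the inputs on which the Python A raises IndexError:
-- the empty matrix (mat[0]) and matrices having a row shorter than the first row.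
def Pre_numSubmat (mat : List (List Int)) : Prop :=
  mat ≠ [] ∧ ∀ row ∈ mat, (mat.getD 0 []).length ≤ row.length
instance (mat : List (List Int)) : Decidable (Pre_numSubmat mat) := by
  unfold Pre_numSubmat; infer_instance
def pvWitness_numSubmat : List (List Int) := [[1, 0], [1, 1]]

def Spec_numSubmat (mat : List (List Int)) (out : Int) : Prop := out = numSubmat_alt mat
instance (mat : List (List Int)) (out : Int) : Decidable (Spec_numSubmat mat out) := by unfold Spec_numSubmat; infer_instance

-- ===== CLAIM (what is proved, stated in full; the proofs are below) =====
def Claim_equal_numSubmat : Prop := ∀ (mat : List (List Int)), Dom_numSubmat mat → Pre_numSubmat mat → Spec_numSubmat mat (numSubmat mat)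

-- ===== LEMMAS AND PROOFS =====
def pvOdd (mat : List (List Int)) (r j : Nat) : Bool := ((mat.getD r []).getD j 0) % 2 == 1
def runF (vb : Nat → Bool) : Nat → Nat
  | 0 => 0
  | t + 1 => if vb t then runF vb t + 1 else 0
def okRb (vb : Nat → Bool) (a b : Nat) : Bool := decide (∀ i ∈ Finset.Ico a b, vb i = true)

theorem runF_le (vb : Nat → Bool) (t : Nat) : runF vb t ≤ t := by
  induction t with
  | zero => simp [runF]
  | succ t ih => simp only [runF]; split <;> omega

theorem okRb_iff (vb : Nat → Bool) (t : Nat) :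
    ∀ r1, r1 ≤ t → (okRb vb r1 t = true ↔ t - runF vb t ≤ r1) := by
  induction t with
  | zero =>
    intro r1 h
    interval_cases r1
    simp [okRb, runF]
  | succ t ih =>
    intro r1 h
    rcases Nat.lt_or_ge r1 (t + 1) with h1 | h1
    · have hsplit : okRb vb r1 (t + 1) = true ↔ (okRb vb r1 t = true ∧ vb t = true) := by
        simp only [okRb, decide_eq_true_eq, Finset.mem_Ico]
        constructor
        · intro hh
          exact ⟨fun i hi => hh i ⟨hi.1, by omega⟩, hh t ⟨by omega, by omega⟩⟩
        · intro hh i hi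
          rcases Nat.lt_or_ge i t with h2 | h2
          · exact hh.1 i ⟨hi.1, h2⟩
          · have : i = t := by omega
            subst this; exact hh.2
      rw [hsplit]
      have ihh := ih r1 (by omega)
      cases hb : vb t with
      | true => simp only [hb, and_true, runF, if_true]; rw [ihh]; omega
      | false => simp only [hb, runF, Bool.false_eq_true, and_false, if_false, false_iff]; omega
    · have : r1 = t + 1 := by omega
      subst this
      simp only [okRb, runF]
      constructor
      · intro _; have := runF_le vb (t+1); omega
      · intro _; simp

theorem card_range_filter_le (t M : Nat) (h : M ≤ t) :
    ((Finset.range t).filter (fun r1 => t - M ≤ r1)).card = M := by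
  have : (Finset.range t).filter (fun r1 => t - M ≤ r1) = Finset.Ico (t - M) t := by
    apply Finset.ext
    intro x
    simp only [Finset.mem_filter, Finset.mem_range, Finset.mem_Ico]
    omega
  rw [this, Nat.card_Ico]
  omega

theorem foldl_range_body (f : Int → Nat → Int) (S : Nat → Int)
    (hf : ∀ acc i, f acc i = acc + S i) :
    ∀ (t : Nat) (a : Int), (List.range t).foldl f a = a + ∑ i ∈ Finset.range t, S i := by
  intro t
  induction t with
  | zero => intro a; simp
  | succ t ih =>
    intro a
    rw [List.range_succ, List.foldl_append, ih, Finset.sum_range_succ]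
    simp only [List.foldl_cons, List.foldl_nil, hf]
    ring

theorem getD_map_range' {α : Type} (f : Nat → α) (n j : Nat) (d : α) (h : j < n) :
    ((List.range n).map f).getD j d = f j := by
  rw [List.getD_eq_getElem?_getD, List.getElem?_map, List.getElem?_range h]
  rfl

theorem foldl_eq_foldl_range {σ : Type} (f : σ → List Int → σ) :
    ∀ (l : List (List Int)) (st : σ),
      l.foldl f st = (List.range l.length).foldl (fun st i => f st (l.getD i [])) st := by
  intro l
  induction l with
  | nil => intro st; simp
  | cons a l ih =>
    intro st
    simp only [List.foldl_cons, List.length_cons, List.range_succ_eq_map,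
      List.foldl_map, List.getD_cons_zero, List.getD_cons_succ]
    exact ih (f st a)

theorem set_append_mid {α : Type} (M : List α) (x y : α) (R : List α) (d : α) :
    (M ++ x :: R).set M.length y = M ++ y :: R ∧ (M ++ x :: R).getD M.length d = x := by
  induction M with
  | nil => simp
  | cons a M ih => simp only [List.cons_append, List.length_cons, List.set_cons_succ,
      List.getD_cons_succ, List.cons.injEq, true_and]; exact ih

theorem foldl_set_range (g : Nat → Int → Int) :
    ∀ (t : Nat) (c : List Int), t ≤ c.length →
    (List.range t).foldl (fun c j => c.set j (g j (c.getD j 0))) c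
      = (List.range t).map (fun j => g j (c.getD j 0)) ++ c.drop t := by
  intro t
  induction t with
  | zero => intro c h; simp
  | succ t ih =>
    intro c h
    rw [List.range_succ, List.foldl_append, List.map_append, ih c (by omega)]
    simp only [List.foldl_cons, List.foldl_nil, List.map_cons, List.map_nil]
    have hlen : ((List.range t).map (fun j => g j (c.getD j 0))).length = t := by simp
    have hdrop : c.drop t = c.getD t 0 :: c.drop (t + 1) := by
      have h1 := List.drop_eq_getElem_cons (l := c) (i := t) (by omega)
      rw [h1, List.getD_eq_getElem?_getD, List.getElem?_eq_getElem (by omega)]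
      rfl
    rw [hdrop]
    have hm := set_append_mid ((List.range t).map (fun j => g j (c.getD j 0)))
      (c.getD t 0) (g t (c.getD t 0)) (c.drop (t + 1)) 0
    rw [hlen] at hm
    rw [hm.2, hm.1]
    simp
def hOKb (mat : List (List Int)) (r1 k j : Nat) : Bool :=
  decide (∀ r ∈ Finset.Ico r1 (r1 + k), pvOdd mat r j = true)
def colMap (mat : List (List Int)) (n r1 k : Nat) : List Int :=
  (List.range n).map (fun j => if hOKb mat r1 k j then (1 : Int) else 0)

theorem band_indicator (b : Bool) (v : Int) :
    PySem.Int.band (if b then (1 : Int) else 0) v = if b && (v % 2 == 1) then (1 : Int) else 0 := by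
  cases b with
  | false =>
    simp only [Bool.false_eq_true, if_false, Bool.false_and]
    rw [PySem.Int.band_comm]
    exact PySem.Int.band_zero v
  | true =>
    simp only [if_true, Bool.true_and]
    rw [PySem.Int.band_comm, PySem.Int.band_one]
    rw [PySem.Int.mod_eq_emod_of_pos (by omega)]
    have h2 : v % 2 = 0 ∨ v % 2 = 1 := by omega
    rcases h2 with h | h <;> simp [h]

theorem hOKb_succ (mat : List (List Int)) (r1 k j : Nat) :
    hOKb mat r1 (k + 1) j = (hOKb mat r1 k j && pvOdd mat (r1 + k) j) := by
  have h : (∀ r ∈ Finset.Ico r1 (r1 + (k + 1)), pvOdd mat r j = true) ↔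
      ((∀ r ∈ Finset.Ico r1 (r1 + k), pvOdd mat r j = true) ∧ pvOdd mat (r1 + k) j = true) := by
    simp only [Finset.mem_Ico]
    constructor
    · intro hh
      exact ⟨fun r hr => hh r ⟨hr.1, by omega⟩, hh (r1 + k) ⟨by omega, by omega⟩⟩
    · intro hh r hr
      rcases Nat.lt_or_ge r (r1 + k) with h2 | h2
      · exact hh.1 r ⟨hr.1, h2⟩
      · have : r = r1 + k := by omega
        subst this; exact hh.2
  simp only [hOKb]
  rw [decide_eq_decide.mpr h, Bool.decide_and, Bool.decide_eq_true]

theorem colMap_zero (mat : List (List Int)) (n r1 : Nat) :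
    colMap mat n r1 0 = List.replicate n 1 := by
  have h : ∀ j, hOKb mat r1 0 j = true := by
    intro j; simp [hOKb]
  simp [colMap, h, List.map_const']

theorem colStep (mat : List (List Int)) (n r1 k : Nat) :
    (List.range n).foldl
      (fun c j => c.set j (PySem.Int.band (c.getD j 0) ((mat.getD (r1 + k) []).getD j 0)))
      (colMap mat n r1 k)
    = colMap mat n r1 (k + 1) := by
  rw [foldl_set_range (fun j x => PySem.Int.band x ((mat.getD (r1 + k) []).getD j 0)) n
    (colMap mat n r1 k) (by simp [colMap])]
  have hdrop : (colMap mat n r1 k).drop n = [] := by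
    apply List.drop_of_length_le; simp [colMap]
  rw [hdrop, List.append_nil]
  apply List.map_congr_left
  intro j hj
  rw [List.mem_range] at hj
  rw [show (colMap mat n r1 k).getD j 0 = (if hOKb mat r1 k j then (1 : Int) else 0) from
    getD_map_range' _ n j 0 hj]
  rw [band_indicator, hOKb_succ]
  rfl

theorem countFold (cb : Nat → Bool) (col : List Int) (n : Nat)
    (hcol : ∀ j, j < n → (col.getD j 0 == 1) = cb j) :
    ∀ t, t ≤ n → ∀ acc : Int,
    (List.range t).foldl
      (fun (p : Int × Int) j => if col.getD j 0 == 1 then (p.1 + 1, p.2 + (p.1 + 1)) else (0, p.2))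
      (0, acc)
      = ((runF cb t : Int), acc + ∑ j2 ∈ Finset.range t, (runF cb (j2 + 1) : Int)) := by
  intro t
  induction t with
  | zero => intro _ acc; simp [runF]
  | succ t ih =>
    intro ht acc
    rw [List.range_succ, List.foldl_append, ih (by omega) acc]
    simp only [List.foldl_cons, List.foldl_nil]
    rw [hcol t (by omega)]
    cases hb : cb t with
    | true =>
      simp only [if_true, Finset.sum_range_succ]
      have : runF cb (t + 1) = runF cb t + 1 := by simp [runF, hb]
      rw [this, Prod.mk.injEq]
      refine ⟨by push_cast; ring, by push_cast; ring⟩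
    | false =>
      simp only [Bool.false_eq_true, if_false, Finset.sum_range_succ]
      have : runF cb (t + 1) = 0 := by simp [runF, hb]
      rw [this]
      simp

def rowSum (mat : List (List Int)) (n r1 k : Nat) : Int :=
  ∑ j2 ∈ Finset.range n, (runF (fun j => hOKb mat r1 (k + 1) j) (j2 + 1) : Int)

theorem loopA (mat : List (List Int)) (n r1 : Nat) :
    ∀ (K : Nat) (res : Int),
    (List.range' r1 K).foldl
      (fun (st : List Int × Int) r2 =>
        let col := (List.range n).foldl
          (fun c j => c.set j (PySem.Int.band (c.getD j 0) ((mat.getD r2 []).getD j 0))) st.1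
        let q := (List.range n).foldl
          (fun (p : Int × Int) j =>
            if col.getD j 0 == 1 then (p.1 + 1, p.2 + (p.1 + 1)) else (0, p.2))
          (0, st.2)
        (col, q.2))
      (colMap mat n r1 0, res)
    = (colMap mat n r1 K, res + ∑ k ∈ Finset.range K, rowSum mat n r1 k) := by
  intro K
  induction K with
  | zero => intro res; simp
  | succ K ih =>
    intro res
    rw [List.range'_1_concat, List.foldl_append, ih res]
    simp only [List.foldl_cons, List.foldl_nil]
    rw [colStep mat n r1 K]
    have hcol : ∀ j, j < n →
        ((colMap mat n r1 (K + 1)).getD j 0 == 1) = hOKb mat r1 (K + 1) j := by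
      intro j hj
      rw [show (colMap mat n r1 (K + 1)).getD j 0
          = (if hOKb mat r1 (K + 1) j then (1 : Int) else 0) from getD_map_range' _ n j 0 hj]
      cases hOKb mat r1 (K + 1) j <;> simp
    rw [countFold (fun j => hOKb mat r1 (K + 1) j) (colMap mat n r1 (K + 1)) n hcol n (le_refl n)]
    rw [Finset.sum_range_succ]
    simp only [rowSum]
    rw [Prod.mk.injEq]
    exact ⟨rfl, by ring⟩


theorem A_val (mat : List (List Int)) :
    numSubmat mat = ∑ r1 ∈ Finset.range mat.length,
      ∑ k ∈ Finset.range (mat.length - r1), rowSum mat (mat.getD 0 []).length r1 k := by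
  unfold numSubmat
  simp only []
  rw [foldl_range_body
    (fun result r1 =>
      ((List.range' r1 (mat.length - r1)).foldl
        (fun (st : List Int × Int) r2 =>
          let col := (List.range (mat.getD 0 []).length).foldl
            (fun c j => c.set j (PySem.Int.band (c.getD j 0) ((mat.getD r2 []).getD j 0))) st.1
          let q := (List.range (mat.getD 0 []).length).foldl
            (fun (p : Int × Int) j =>
              if col.getD j 0 == 1 then (p.1 + 1, p.2 + (p.1 + 1)) else (0, p.2))
            (0, st.2)
          (col, q.2))
        (List.replicate (mat.getD 0 []).length 1, result)).2)
    (fun r1 => ∑ k ∈ Finset.range (mat.length - r1), rowSum mat (mat.getD 0 []).length r1 k)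
    (by
      intro acc r1
      beta_reduce
      rw [← colMap_zero mat (mat.getD 0 []).length r1,
        loopA mat (mat.getD 0 []).length r1 (mat.length - r1) acc])
    mat.length 0]
  rw [zero_add]


def minSeg (h : List Int) (a : Nat) : Nat → Int
  | 0 => h.getD a 0
  | i + 1 => min (minSeg h a i) (h.getD (a + i + 1) 0)

def sumMinAux (h : List Int) : List Nat → Int → Int
  | [], _ => 0
  | j :: rest, mn => min mn (h.getD j 0) + sumMinAux h rest (min mn (h.getD j 0))

theorem sumMinAux_zero (h : List Int) :
    ∀ l : List Nat, (∀ j ∈ l, 0 ≤ h.getD j 0) → sumMinAux h l 0 = 0 := by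
  intro l
  induction l with
  | nil => intro _; rfl
  | cons j rest ih =>
    intro hl
    have hj : 0 ≤ h.getD j 0 := hl j (by simp)
    have hmin : min (0 : Int) (h.getD j 0) = 0 := by omega
    simp only [sumMinAux, hmin, zero_add]
    exact ih (fun x hx => hl x (by simp [hx]))

theorem innerRun_eq (h : List Int) :
    ∀ (l : List Nat) (mn tot : Int), (∀ j ∈ l, 0 ≤ h.getD j 0) → 0 ≤ mn →
    numSubmat_innerRun h l mn tot = tot + sumMinAux h l mn := by
  intro l
  induction l with
  | nil => intro mn tot _ _; simp [numSubmat_innerRun, sumMinAux]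
  | cons j rest ih =>
    intro mn tot hl hmn
    have hj : 0 ≤ h.getD j 0 := hl j (by simp)
    have hup : (if h.getD j 0 < mn then h.getD j 0 else mn) = min mn (h.getD j 0) := by
      rw [min_def]; split <;> split <;> omega
    have hrest : ∀ x ∈ rest, 0 ≤ h.getD x 0 := fun x hx => hl x (by simp [hx])
    simp only [numSubmat_innerRun, sumMinAux, hup]
    by_cases h0 : min mn (h.getD j 0) = 0
    · rw [h0]
      simp only [beq_self_eq_true, if_true]
      rw [sumMinAux_zero h rest hrest]
      ring
    · have : (min mn (h.getD j 0) == 0) = false := by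
        rwa [beq_eq_false_iff_ne]
      rw [this]
      simp only [Bool.false_eq_true, if_false]
      rw [ih (min mn (h.getD j 0)) (tot + min mn (h.getD j 0)) hrest (by omega)]
      ring

theorem minSeg_le_start (h : List Int) (a : Nat) :
    ∀ i, minSeg h a i ≤ h.getD a 0 := by
  intro i
  induction i with
  | zero => simp [minSeg]
  | succ i ih => exact le_trans (min_le_left _ _) ih

theorem minSeg_shift (h : List Int) (a : Nat) :
    ∀ i, minSeg h a (i + 1) = min (h.getD a 0) (minSeg h (a + 1) i) := by
  intro i
  induction i with
  | zero => simp only [minSeg]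
  | succ i ih =>
    have e1 : minSeg h a (i + 1 + 1) = min (minSeg h a (i + 1)) (h.getD (a + (i + 1) + 1) 0) := rfl
    have e2 : minSeg h (a + 1) (i + 1) = min (minSeg h (a + 1) i) (h.getD (a + 1 + i + 1) 0) := rfl
    have e3 : a + (i + 1) + 1 = a + 1 + i + 1 := by omega
    rw [e1, e2, ih, e3]
    omega

theorem sumMin_eq (h : List Int) :
    ∀ (c a : Nat) (mn : Int),
    sumMinAux h (List.range' a c) mn = ∑ i ∈ Finset.range c, min mn (minSeg h a i) := by
  intro c
  induction c with
  | zero => intro a mn; simp [sumMinAux]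
  | succ c ih =>
    intro a mn
    rw [List.range'_succ]
    simp only [sumMinAux]
    rw [ih (a + 1) (min mn (h.getD a 0)), Finset.sum_range_succ']
    have : ∀ i, min (min mn (h.getD a 0)) (minSeg h (a + 1) i) = min mn (minSeg h a (i + 1)) := by
      intro i
      rw [minSeg_shift]
      omega
    simp only [this, minSeg]
    ring

def vrun (mat : List (List Int)) (j t : Nat) : Nat := runF (fun r => pvOdd mat r j) t

def htsL (mat : List (List Int)) (n t : Nat) : List Int :=
  (List.range n).map (fun j => (vrun mat j t : Int))

theorem htsL_zero (mat : List (List Int)) (n : Nat) : htsL mat n 0 = List.replicate n 0 := by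
  simp [htsL, vrun, runF, List.map_const']

theorem htsL_getD (mat : List (List Int)) (n t j : Nat) (hj : j < n) :
    (htsL mat n t).getD j 0 = (vrun mat j t : Int) :=
  getD_map_range' _ n j 0 hj

theorem htsL_nonneg (mat : List (List Int)) (n t : Nat) :
    ∀ j, 0 ≤ (htsL mat n t).getD j 0 := by
  intro j
  by_cases hj : j < n
  · rw [htsL_getD mat n t j hj]; positivity
  · rw [List.getD_eq_getElem?_getD, List.getElem?_eq_none (by simp [htsL]; omega)]
    simp

theorem htsL_step (mat : List (List Int)) (n t : Nat) :
    ((List.range n).map (fun j =>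
      if PySem.Int.mod ((mat.getD t []).getD j 0) 2 == 1
      then (htsL mat n t).getD j 0 + 1 else 0)) = htsL mat n (t + 1) := by
  apply List.map_congr_left
  intro j hj
  rw [List.mem_range] at hj
  rw [htsL_getD mat n t j hj]
  rw [PySem.Int.mod_eq_emod_of_pos (by omega)]
  have hcond : (((mat.getD t []).getD j 0) % 2 == 1) = pvOdd mat t j := rfl
  rw [hcond]
  have hv : vrun mat j (t + 1) = if pvOdd mat t j then vrun mat j t + 1 else 0 := rfl
  rw [hv]
  cases pvOdd mat t j <;> simp

theorem innerTotal (mat : List (List Int)) (n t : Nat) (j1 : Nat) (tot : Int) :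
    numSubmat_innerRun (htsL mat n t) (List.range' j1 (n - j1)) ((htsL mat n t).getD j1 0) tot
    = tot + ∑ i ∈ Finset.range (n - j1), minSeg (htsL mat n t) j1 i := by
  rw [innerRun_eq (htsL mat n t) _ _ tot (fun j _ => htsL_nonneg mat n t j)
    (htsL_nonneg mat n t j1)]
  rw [sumMin_eq]
  congr 1
  apply Finset.sum_congr rfl
  intro i _
  exact min_eq_right (minSeg_le_start (htsL mat n t) j1 i)

def rowT (mat : List (List Int)) (n t : Nat) : Int :=
  ∑ j1 ∈ Finset.range n, ∑ i ∈ Finset.range (n - j1), minSeg (htsL mat n (t + 1)) j1 i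

theorem loopB (mat : List (List Int)) (n : Nat) :
    ∀ (T : Nat) (tot : Int),
    (List.range T).foldl
      (fun (st : List Int × Int) t =>
        let heights := (List.range n).map (fun j =>
          if PySem.Int.mod ((mat.getD t []).getD j 0) 2 == 1 then st.1.getD j 0 + 1 else 0)
        let total := (List.range n).foldl (fun total j1 =>
          numSubmat_innerRun heights (List.range' j1 (n - j1)) (heights.getD j1 0) total) st.2
        (heights, total))
      (htsL mat n 0, tot)
    = (htsL mat n T, tot + ∑ t ∈ Finset.range T, rowT mat n t) := by
  intro T
  induction T with
  | zero => intro tot; simp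
  | succ T ih =>
    intro tot
    rw [List.range_succ, List.foldl_append, ih tot]
    simp only [List.foldl_cons, List.foldl_nil]
    rw [htsL_step mat n T]
    rw [foldl_range_body
      (fun total j1 =>
        numSubmat_innerRun (htsL mat n (T + 1)) (List.range' j1 (n - j1))
          ((htsL mat n (T + 1)).getD j1 0) total)
      (fun j1 => ∑ i ∈ Finset.range (n - j1), minSeg (htsL mat n (T + 1)) j1 i)
      (fun acc j1 => innerTotal mat n (T + 1) j1 acc) n]
    rw [Finset.sum_range_succ, Prod.mk.injEq]
    refine ⟨rfl, ?_⟩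
    simp only [rowT]
    ring

theorem B_val (mat : List (List Int)) :
    numSubmat_alt mat = ∑ t ∈ Finset.range mat.length,
      rowT mat (mat.getD 0 []).length t := by
  unfold numSubmat_alt
  simp only []
  rw [foldl_eq_foldl_range]
  rw [← htsL_zero mat (mat.getD 0 []).length]
  rw [loopB mat (mat.getD 0 []).length mat.length 0]
  rw [zero_add]

theorem card_okRb (cb : Nat → Bool) (t : Nat) :
    ((Finset.range t).filter (fun x => okRb cb x t = true)).card = runF cb t := by
  have hcong : (Finset.range t).filter (fun x => okRb cb x t = true)
      = (Finset.range t).filter (fun x => t - runF cb t ≤ x) := by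
    apply Finset.filter_congr
    intro x hx
    rw [Finset.mem_range] at hx
    exact okRb_iff cb t x (by omega)
  rw [hcong, card_range_filter_le t (runF cb t) (runF_le cb t)]

theorem runF_as_sum (cb : Nat → Bool) (t : Nat) :
    (runF cb t : Int) = ∑ x ∈ Finset.range t, (if okRb cb x t then (1 : Int) else 0) := by
  rw [← card_okRb cb t, Finset.card_filter]
  push_cast
  rfl

def RectB (mat : List (List Int)) (r1 t j1 j2 : Nat) : Bool :=
  decide (∀ j ∈ Finset.Ico j1 j2, ∀ r ∈ Finset.Ico r1 t, pvOdd mat r j = true)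

theorem okRb_hOKb (mat : List (List Int)) (r1 k j1 j2 : Nat) :
    okRb (fun j => hOKb mat r1 k j) j1 j2 = RectB mat r1 (r1 + k) j1 j2 := by
  simp only [okRb, RectB, hOKb, decide_eq_true_eq]

def minV (mat : List (List Int)) (t j1 : Nat) : Nat → Nat
  | 0 => vrun mat j1 t
  | i + 1 => min (minV mat t j1 i) (vrun mat (j1 + i + 1) t)

theorem minV_le (mat : List (List Int)) (t j1 : Nat) : ∀ i, minV mat t j1 i ≤ t := by
  intro i
  induction i with
  | zero => exact runF_le _ t
  | succ i ih => simp only [minV]; omega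

theorem minSeg_cast (mat : List (List Int)) (n t j1 : Nat) :
    ∀ i, j1 + i < n → minSeg (htsL mat n t) j1 i = (minV mat t j1 i : Int) := by
  intro i
  induction i with
  | zero => intro h; simpa [minSeg, minV] using htsL_getD mat n t j1 (by omega)
  | succ i ih =>
    intro h
    have e1 : minSeg (htsL mat n t) j1 (i + 1)
        = min (minSeg (htsL mat n t) j1 i) ((htsL mat n t).getD (j1 + i + 1) 0) := rfl
    rw [e1, ih (by omega), htsL_getD mat n t (j1 + i + 1) (by omega)]
    simp only [minV]
    push_cast
    omega

theorem rectB_split (mat : List (List Int)) (r1 t j1 i : Nat) :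
    (RectB mat r1 t j1 (j1 + i + 2) = true)
      ↔ (RectB mat r1 t j1 (j1 + i + 1) = true ∧ okRb (fun r => pvOdd mat r (j1 + i + 1)) r1 t = true) := by
  simp only [RectB, okRb, decide_eq_true_eq, Finset.mem_Ico]
  constructor
  · intro h
    exact ⟨fun j hj => h j ⟨hj.1, by omega⟩, h (j1 + i + 1) ⟨by omega, by omega⟩⟩
  · intro h j hj
    rcases Nat.lt_or_ge j (j1 + i + 1) with h2 | h2
    · exact h.1 j ⟨hj.1, h2⟩
    · have : j = j1 + i + 1 := by omega
      subst this; exact h.2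

theorem rectB_iff (mat : List (List Int)) (t j1 : Nat) :
    ∀ (i r1 : Nat), r1 ≤ t →
      (RectB mat r1 t j1 (j1 + i + 1) = true ↔ t - minV mat t j1 i ≤ r1) := by
  intro i
  induction i with
  | zero =>
    intro r1 hr1
    have h1 : (RectB mat r1 t j1 (j1 + 0 + 1) = true)
        ↔ (okRb (fun r => pvOdd mat r j1) r1 t = true) := by
      simp only [RectB, okRb, decide_eq_true_eq]
      constructor
      · intro h r hr
        exact h j1 (by simp) r hr
      · intro h j hj r hr
        rw [Finset.mem_Ico] at hj
        have : j = j1 := by omega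
        subst this; exact h r hr
    rw [h1, okRb_iff _ t r1 hr1]
    simp [minV, vrun]
  | succ i ih =>
    intro r1 hr1
    have e : j1 + (i + 1) + 1 = j1 + i + 2 := by omega
    rw [e, rectB_split, ih r1 hr1, okRb_iff _ t r1 hr1]
    have : vrun mat (j1 + i + 1) t = runF (fun r => pvOdd mat r (j1 + i + 1)) t := rfl
    rw [← this]
    simp only [minV]
    omega

theorem card_rect (mat : List (List Int)) (t j1 i : Nat) :
    ((Finset.range t).filter (fun r1 => RectB mat r1 t j1 (j1 + i + 1) = true)).card
      = minV mat t j1 i := by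
  have hcong : (Finset.range t).filter (fun r1 => RectB mat r1 t j1 (j1 + i + 1) = true)
      = (Finset.range t).filter (fun r1 => t - minV mat t j1 i ≤ r1) := by
    apply Finset.filter_congr
    intro x hx
    rw [Finset.mem_range] at hx
    exact rectB_iff mat t j1 i x (by omega)
  rw [hcong, card_range_filter_le t (minV mat t j1 i) (minV_le mat t j1 i)]

theorem minV_as_sum (mat : List (List Int)) (t j1 i : Nat) :
    (minV mat t j1 i : Int)
      = ∑ r1 ∈ Finset.range t, (if RectB mat r1 t j1 (j1 + i + 1) then (1 : Int) else 0) := by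
  rw [← card_rect mat t j1 i, Finset.card_filter]
  push_cast
  rfl

theorem rowSum_ind (mat : List (List Int)) (n r1 k : Nat) :
    rowSum mat n r1 k
      = ∑ j2 ∈ Finset.range n, ∑ j1 ∈ Finset.range (j2 + 1),
          (if RectB mat r1 (r1 + k + 1) j1 (j2 + 1) then (1 : Int) else 0) := by
  unfold rowSum
  apply Finset.sum_congr rfl
  intro j2 _
  rw [runF_as_sum]
  apply Finset.sum_congr rfl
  intro j1 _
  rw [okRb_hOKb]
  rfl

theorem rowT_ind (mat : List (List Int)) (n t : Nat) :
    rowT mat n t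
      = ∑ j1 ∈ Finset.range n, ∑ i ∈ Finset.range (n - j1), ∑ r1 ∈ Finset.range (t + 1),
          (if RectB mat r1 (t + 1) j1 (j1 + i + 1) then (1 : Int) else 0) := by
  unfold rowT
  apply Finset.sum_congr rfl
  intro j1 hj1
  rw [Finset.mem_range] at hj1
  apply Finset.sum_congr rfl
  intro i hi
  rw [Finset.mem_range] at hi
  rw [minSeg_cast mat n (t + 1) j1 i (by omega), minV_as_sum]

theorem tri (m : Nat) (f : Nat → Nat → Int) :
    ∑ a ∈ Finset.range m, ∑ b ∈ Finset.Ico a m, f a b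
      = ∑ b ∈ Finset.range m, ∑ a ∈ Finset.range (b + 1), f a b := by
  have h := Finset.sum_Ico_Ico_comm 0 m f
  rw [Finset.range_eq_Ico]
  exact h

theorem AB_eq (mat : List (List Int)) (n : Nat) :
    ∑ r1 ∈ Finset.range mat.length, ∑ k ∈ Finset.range (mat.length - r1), rowSum mat n r1 k
      = ∑ t ∈ Finset.range mat.length, rowT mat n t := by
  have hA : ∀ r1 : Nat, ∑ k ∈ Finset.range (mat.length - r1), rowSum mat n r1 k
      = ∑ r2 ∈ Finset.Ico r1 mat.length, ∑ j2 ∈ Finset.range n, ∑ j1 ∈ Finset.range (j2 + 1),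
          (if RectB mat r1 (r2 + 1) j1 (j2 + 1) then (1 : Int) else 0) := by
    intro r1
    rw [Finset.sum_Ico_eq_sum_range]
    apply Finset.sum_congr rfl
    intro k _
    exact rowSum_ind mat n r1 k
  have hB : ∀ t : Nat, rowT mat n t
      = ∑ j2 ∈ Finset.range n, ∑ j1 ∈ Finset.range (j2 + 1), ∑ r1 ∈ Finset.range (t + 1),
          (if RectB mat r1 (t + 1) j1 (j2 + 1) then (1 : Int) else 0) := by
    intro t
    rw [rowT_ind mat n t]
    have h1 : ∀ j1 : Nat, ∑ i ∈ Finset.range (n - j1), ∑ r1 ∈ Finset.range (t + 1),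
        (if RectB mat r1 (t + 1) j1 (j1 + i + 1) then (1 : Int) else 0)
        = ∑ j2 ∈ Finset.Ico j1 n, ∑ r1 ∈ Finset.range (t + 1),
            (if RectB mat r1 (t + 1) j1 (j2 + 1) then (1 : Int) else 0) := by
      intro j1
      rw [Finset.sum_Ico_eq_sum_range]
    simp only [h1]
    exact tri n (fun j1 j2 => ∑ r1 ∈ Finset.range (t + 1),
      (if RectB mat r1 (t + 1) j1 (j2 + 1) then (1 : Int) else 0))
  refine (Finset.sum_congr rfl (fun r1 _ => hA r1)).trans ?_
  rw [tri mat.length (fun r1 r2 => ∑ j2 ∈ Finset.range n, ∑ j1 ∈ Finset.range (j2 + 1),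
    (if RectB mat r1 (r2 + 1) j1 (j2 + 1) then (1 : Int) else 0))]
  apply Finset.sum_congr rfl
  intro r2 _
  rw [hB r2, Finset.sum_comm]
  apply Finset.sum_congr rfl
  intro j2 _
  rw [Finset.sum_comm]

theorem main_eq (mat : List (List Int)) : numSubmat mat = numSubmat_alt mat := by
  rw [A_val, B_val, AB_eq]

-- ===== VERDICT (by name: the statement is the Claim_ definition above) =====
theorem numSubmat_spec : Claim_equal_numSubmat := by
  intro mat _ _
  show numSubmat mat = numSubmat_alt mat
  exact main_eq mat
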